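-- pv_equiv track=rewrite | github.com/smuuule/aoc2023-smule | 18/solution.py | count_area
-- ===== SOURCE A (Python) =====
-- directions = {'R':(1, 0), 'D':(0, 1), 'L':(-1, 0), 'U':(0, -1)}
--
-- def count_area(instructions):
--     num = 0
--     curr = (0, 0)
--     points: list[tuple[int, int]] = []
--     for [direction, steps, _] in instructions:
--         points.append(curr)
--         num += steps
--         dir_letter = directions[direction]
--         curr = (curr[0] + dir_letter[0] * steps, curr[1] + dir_letter[1] * steps)
--
--     area = 0
--     for i in range(len(points)):
--         area += points[i][0] * (points[i-1][1] - points[(i+1) % len(points)][1])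
--
--     return ((abs(area) // 2) - num // 2 + 1) + num
-- ===== SOURCE B (Python) =====
-- directions = {'R': (1, 0), 'D': (0, 1), 'L': (-1, 0), 'U': (0, -1)}
--
-- def count_area(instructions):
--     # Green's theorem on the axis-aligned edges: only HORIZONTAL moves carry
--     # area (a strip of height y and width dx*steps); vertical moves contribute
--     # nothing, and the closing edge of the vertex cycle back to the origin
--     # contributes x*y.  No vertex list, no cross products.
--     if not instructions:
--         return 1
--     num = 0
--     x = y = 0
--     twoA = 0
--     for direction, steps, _ in instructions[:-1]:
--         num += steps
--         dx, dy = directions[direction]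
--         if dy == 0:
--             twoA -= 2 * y * dx * steps
--         x += dx * steps
--         y += dy * steps
--     num += instructions[-1][1]
--     twoA += x * y
--     return abs(twoA) // 2 - num // 2 + 1 + num
-- ===== Notes on version B (the rewrite author's own statement) =====
-- stated objective: alternative
-- what changed: B computes the doubled area by Green's theorem over the axis-aligned edges -- only horizontal moves contribute a strip -2*y*dx*steps, vertical moves contribute nothing, plus one closing term x*y -- instead of A's vertex list and modular-index shoelace cross-product pass.
import Mathlib
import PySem

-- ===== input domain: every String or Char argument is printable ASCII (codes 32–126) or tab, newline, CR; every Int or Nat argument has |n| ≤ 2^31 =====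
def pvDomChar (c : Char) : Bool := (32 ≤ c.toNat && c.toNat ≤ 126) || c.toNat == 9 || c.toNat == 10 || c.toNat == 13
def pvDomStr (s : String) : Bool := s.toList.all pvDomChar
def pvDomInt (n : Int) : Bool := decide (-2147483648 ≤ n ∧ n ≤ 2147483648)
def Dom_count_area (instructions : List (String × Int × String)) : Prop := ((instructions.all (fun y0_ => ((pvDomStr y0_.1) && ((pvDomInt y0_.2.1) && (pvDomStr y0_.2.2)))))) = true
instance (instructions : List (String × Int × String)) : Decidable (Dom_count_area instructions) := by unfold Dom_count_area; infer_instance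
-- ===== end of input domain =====

-- B replaces A's vertex list + modular-index shoelace pass by a Green's-theorem sweep:
-- only horizontal moves contribute area strips (-2*y*dx*steps), vertical moves contribute
-- nothing, plus one closing term x*y; same O(n) cost, no vertex list.

-- the module-level dict `directions`
def pvDirs : PySem.Dict String (Int × Int) :=
  PySem.Dict.ofList [("R", (1, 0)), ("D", (0, 1)), ("L", (-1, 0)), ("U", (0, -1))]

-- `directions[d]`; KeyError (missing key) is excluded by Pre_count_area, the default is never used there
def pvDir (s : String) : Int × Int := (pvDirs.get? s).getD (0, 0)

-- ===== PORT A =====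
def count_area (instructions : List (String × Int × String)) : Int :=
  let st := instructions.foldl
    (fun (s : Int × (Int × Int) × List (Int × Int)) inst =>
      let points := s.2.2 ++ [s.2.1]
      let num := s.1 + inst.2.1
      let d := pvDir inst.1
      (num, (s.2.1.1 + d.1 * inst.2.1, s.2.1.2 + d.2 * inst.2.1), points))
    (0, (0, 0), [])
  let num := st.1
  let points := st.2.2
  let area := (List.range points.length).foldl
    (fun (area : Int) (i : Nat) =>
      area + ((PySem.List.pyGet? points (i : Int)).getD (0, 0)).1 *
        (((PySem.List.pyGet? points ((i : Int) - 1)).getD (0, 0)).2 -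
         ((PySem.List.pyGet? points (PySem.Int.mod ((i : Int) + 1) (points.length : Int))).getD (0, 0)).2))
    0
  PySem.Int.floordiv (area.natAbs : Int) 2 - PySem.Int.floordiv num 2 + 1 + num

-- ===== PORT B =====
def count_area_alt (instructions : List (String × Int × String)) : Int :=
  if instructions = [] then 1
  else
    let st := (PySem.List.slice instructions none (some (-1))).foldl
      (fun (s : Int × (Int × Int) × Int) inst =>
        let num := s.1 + inst.2.1
        let d := pvDir inst.1
        let twoA := if d.2 = 0 then s.2.2 - 2 * s.2.1.2 * d.1 * inst.2.1 else s.2.2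
        (num, (s.2.1.1 + d.1 * inst.2.1, s.2.1.2 + d.2 * inst.2.1), twoA))
      (0, (0, 0), 0)
    let num := st.1 + ((PySem.List.pyGet? instructions (-1)).getD ("", 0, "")).2.1
    let twoA := st.2.2 + st.2.1.1 * st.2.1.2
    PySem.Int.floordiv (twoA.natAbs : Int) 2 - PySem.Int.floordiv num 2 + 1 + num

-- ===== PRECONDITION & SPEC =====
-- Pre_ excludes exactly the instructions whose direction letter is not a key of `directions`:
-- there Python A raises KeyError.
def Pre_count_area (instructions : List (String × Int × String)) : Prop :=
  ∀ inst ∈ instructions, inst.1 = "R" ∨ inst.1 = "D" ∨ inst.1 = "L" ∨ inst.1 = "U"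
instance (instructions : List (String × Int × String)) : Decidable (Pre_count_area instructions) := by
  unfold Pre_count_area; infer_instance

def pvWitness_count_area : (List (String × Int × String)) :=
  [("R", 2, "a"), ("D", 2, "b"), ("L", 2, "c"), ("U", 2, "d")]

def Spec_count_area (instructions : List (String × Int × String)) (out : Int) : Prop := out = count_area_alt instructions
instance (instructions : List (String × Int × String)) (out : Int) : Decidable (Spec_count_area instructions out) := by unfold Spec_count_area; infer_instance

-- ===== CLAIM (what is proved, stated in full; the proofs are below) =====
def Claim_equal_count_area : Prop := ∀ (instructions : List (String × Int × String)), Dom_count_area instructions → Pre_count_area instructions → Spec_count_area instructions (count_area instructions)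

-- ===== LEMMAS AND PROOFS =====

-- proof-side helpers
def pvMove (c : Int × Int) (i : String × Int × String) : Int × Int :=
  (c.1 + (pvDir i.1).1 * i.2.1, c.2 + (pvDir i.1).2 * i.2.1)

def pvPts : (Int × Int) → List (String × Int × String) → List (Int × Int)
  | _, [] => []
  | c, i :: r => c :: pvPts (pvMove c i) r

def pvEnd : (Int × Int) → List (String × Int × String) → Int × Int
  | c, [] => c
  | c, i :: r => pvEnd (pvMove c i) r

def pvSteps : List (String × Int × String) → Int
  | [] => 0
  | i :: r => i.2.1 + pvSteps r

def pvCr (a b : Int × Int) : Int := a.1 * b.2 - b.1 * a.2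

def pvAdj : List (Int × Int) → Int
  | a :: b :: r => pvCr a b + pvAdj (b :: r)
  | _ => 0

-- B's per-edge strip contribution and its running sum
def pvTrap (c : Int × Int) (i : String × Int × String) : Int :=
  if (pvDir i.1).2 = 0 then -(2 * c.2 * (pvDir i.1).1 * i.2.1) else 0

def pvTrapSum : (Int × Int) → List (String × Int × String) → Int
  | _, [] => 0
  | c, i :: r => pvTrap c i + pvTrapSum (pvMove c i) r

def pvChain : (Int × Int) → List (String × Int × String) → Int
  | _, [] => 0
  | c, i :: r => pvCr c (pvMove c i) + pvChain (pvMove c i) r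

lemma foldA_eq (l : List (String × Int × String)) (num : Int) (curr : Int × Int)
    (pts : List (Int × Int)) :
    l.foldl
      (fun (s : Int × (Int × Int) × List (Int × Int)) inst =>
        let points := s.2.2 ++ [s.2.1]
        let num := s.1 + inst.2.1
        let d := pvDir inst.1
        (num, (s.2.1.1 + d.1 * inst.2.1, s.2.1.2 + d.2 * inst.2.1), points))
      (num, curr, pts)
    = (num + pvSteps l, pvEnd curr l, pts ++ pvPts curr l) := by
  induction l generalizing num curr pts with
  | nil => simp [pvSteps, pvEnd, pvPts]
  | cons i r ih =>
    simp only [List.foldl_cons, pvSteps, pvEnd, pvPts]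
    rw [ih]
    simp [pvMove, List.append_assoc]
    ring

lemma foldB_eq (l : List (String × Int × String)) (num : Int) (c : Int × Int) (t : Int) :
    l.foldl
      (fun (s : Int × (Int × Int) × Int) inst =>
        let num := s.1 + inst.2.1
        let d := pvDir inst.1
        let twoA := if d.2 = 0 then s.2.2 - 2 * s.2.1.2 * d.1 * inst.2.1 else s.2.2
        (num, (s.2.1.1 + d.1 * inst.2.1, s.2.1.2 + d.2 * inst.2.1), twoA))
      (num, c, t)
    = (num + pvSteps l, pvEnd c l, t + pvTrapSum c l) := by
  induction l generalizing num c t with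
  | nil => simp [pvSteps, pvEnd, pvTrapSum]
  | cons i r ih =>
    simp only [List.foldl_cons, pvSteps, pvEnd, pvTrapSum, pvTrap, pvMove]
    rw [ih]
    split_ifs with h <;> simp <;> and_intros <;> ring

lemma pvDir_axis (s : String) : (pvDir s).1 = 0 ∨ (pvDir s).2 = 0 := by
  by_cases h1 : s = "R"; · subst h1; right; decide
  by_cases h2 : s = "D"; · subst h2; left; decide
  by_cases h3 : s = "L"; · subst h3; right; decide
  by_cases h4 : s = "U"; · subst h4; left; decide
  have : pvDir s = (0, 0) := by
    unfold pvDir pvDirs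
    simp [PySem.Dict.ofList, PySem.Dict.update, PySem.Dict.get?_insert, PySem.Dict.get?_empty,
      h1, h2, h3, h4]
  rw [this]; left; rfl

lemma pvTrap_eq (c : Int × Int) (i : String × Int × String) :
    pvTrap c i = pvCr c (pvMove c i) + c.1 * c.2 - (pvMove c i).1 * (pvMove c i).2 := by
  unfold pvTrap pvCr pvMove
  rcases pvDir_axis i.1 with h | h <;> rw [h] <;> split_ifs <;> ring_nf <;> simp_all <;> ring

lemma pvTrapSum_eq (l : List (String × Int × String)) :
    ∀ c, pvTrapSum c l = pvChain c l + c.1 * c.2 - (pvEnd c l).1 * (pvEnd c l).2 := by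
  induction l with
  | nil => intro c; simp [pvTrapSum, pvChain, pvEnd]
  | cons i r ih =>
    intro c
    simp only [pvTrapSum, pvChain, pvEnd]
    rw [pvTrap_eq, ih]
    ring

lemma pvChain_adj (l : List (String × Int × String)) :
    ∀ c, pvAdj (pvPts c l ++ [pvEnd c l]) = pvChain c l := by
  induction l with
  | nil => intro c; simp [pvPts, pvEnd, pvChain, pvAdj]
  | cons i r ih =>
    intro c
    simp only [pvPts, pvEnd, pvChain, List.cons_append]
    rw [← ih (pvMove c i)]
    cases hr : pvPts (pvMove c i) r with
    | nil =>
      cases r with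
      | nil => simp [pvPts, pvEnd, pvAdj]
      | cons j t => simp [pvPts] at hr
    | cons p t =>
      have hp : p = pvMove c i := by
        cases r with
        | nil => simp [pvPts] at hr
        | cons j t' => simp [pvPts] at hr; exact hr.1.symm
      subst hp
      simp [pvAdj]

lemma pvPts_concat (l : List (String × Int × String)) (i : String × Int × String) :
    ∀ c, pvPts c (l ++ [i]) = pvPts c l ++ [pvEnd c l] := by
  induction l with
  | nil => intro c; simp [pvPts, pvEnd]
  | cons j r ih => intro c; simp [pvPts, pvEnd, ih]

lemma pvSteps_concat (l : List (String × Int × String)) (i : String × Int × String) :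
    pvSteps (l ++ [i]) = pvSteps l + i.2.1 := by
  induction l with
  | nil => simp [pvSteps]
  | cons j r ih => simp [pvSteps, ih]; ring

def pvAdjS (pts : List (Int × Int)) : Int :=
  ∑ j ∈ Finset.range (pts.length - 1),
    pvCr (pts.getD j (0, 0)) (pts.getD (j + 1) (0, 0))

lemma pvAdj_eq_sum (pts : List (Int × Int)) : pvAdj pts = pvAdjS pts := by
  induction pts with
  | nil => simp [pvAdj, pvAdjS]
  | cons a t ih =>
    cases t with
    | nil => simp [pvAdj, pvAdjS]
    | cons b r =>
      simp only [pvAdj, pvAdjS] at *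
      rw [ih]
      have hlen : (a :: b :: r).length - 1 = (r.length) + 1 := by simp
      rw [hlen, Finset.sum_range_succ']
      simp [pvCr]
      ring

lemma mod_round (n i : Nat) (hi : i < n) : ((i + 1) % n + (n - 1)) % n = i := by
  have h1 : (i + 1) % n + (n - 1) ≡ (i + 1) + (n - 1) [MOD n] :=
    Nat.ModEq.add_right _ (Nat.mod_modEq (i + 1) n)
  have h2 : (i + 1) + (n - 1) = i + n := by omega
  calc ((i + 1) % n + (n - 1)) % n = ((i + 1) + (n - 1)) % n := h1
    _ = (i + n) % n := by rw [h2]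
    _ = i % n := by simp [Nat.add_mod_right]
    _ = i := Nat.mod_eq_of_lt hi

lemma mod_round' (n j : Nat) (hj : j < n) : ((j + (n - 1)) % n + 1) % n = j := by
  have h1 : (j + (n - 1)) % n + 1 ≡ (j + (n - 1)) + 1 [MOD n] :=
    Nat.ModEq.add_right _ (Nat.mod_modEq (j + (n - 1)) n)
  have h2 : (j + (n - 1)) + 1 = j + n := by omega
  calc ((j + (n - 1)) % n + 1) % n = ((j + (n - 1)) + 1) % n := h1
    _ = (j + n) % n := by rw [h2]
    _ = j % n := by simp [Nat.add_mod_right]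
    _ = j := Nat.mod_eq_of_lt hj

lemma sum_reindex (n : Nat) (hn : 0 < n) (u v : Nat → Int) :
    ∑ i ∈ Finset.range n, u i * v ((i + 1) % n)
      = ∑ j ∈ Finset.range n, u ((j + (n - 1)) % n) * v j := by
  apply Finset.sum_nbij' (i := fun i => (i + 1) % n) (j := fun j => (j + (n - 1)) % n)
  · intro a ha; exact Finset.mem_range.mpr (Nat.mod_lt _ hn)
  · intro a ha; exact Finset.mem_range.mpr (Nat.mod_lt _ hn)
  · intro a ha; exact mod_round n a (Finset.mem_range.mp ha)
  · intro a ha; exact mod_round' n a (Finset.mem_range.mp ha)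
  · intro a ha
    rw [mod_round n a (Finset.mem_range.mp ha)]

lemma pm_zero (n : Nat) (hn : 0 < n) : (0 + (n - 1)) % n = n - 1 := by
  rw [Nat.zero_add]; exact Nat.mod_eq_of_lt (by omega)

lemma pm_succ (n i : Nat) (h : i + 1 < n) : ((i + 1) + (n - 1)) % n = i := by
  have h2 : (i + 1) + (n - 1) = i + n := by omega
  rw [h2, Nat.add_mod_right]; exact Nat.mod_eq_of_lt (by omega)

lemma foldl_range_add (n : Nat) (t : Nat → Int) (a : Int) :
    (List.range n).foldl (fun acc i => acc + t i) a = a + ∑ i ∈ Finset.range n, t i := by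
  induction n generalizing a with
  | zero => simp
  | succ m ih =>
    rw [List.range_succ, List.foldl_append, ih, Finset.sum_range_succ]
    simp [add_assoc]

lemma pvPts_head (l : List (String × Int × String)) (c : Int × Int) (h : l ≠ []) :
    (pvPts c l).getD 0 (0, 0) = c := by
  cases l with
  | nil => exact absurd rfl h
  | cons i r => simp [pvPts]

-- the cyclic shoelace sum of A equals minus the adjacent-pair sum, given the first vertex is the origin
lemma cyclic_eq (pts : List (Int × Int)) (h0 : pts = [] ∨ pts.getD 0 (0, 0) = (0, 0)) :
    (∑ i ∈ Finset.range pts.length,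
        (pts.getD i (0, 0)).1 *
          ((pts.getD ((i + (pts.length - 1)) % pts.length) (0, 0)).2
            - (pts.getD ((i + 1) % pts.length) (0, 0)).2))
      = - pvAdj pts := by
  cases h0 with
  | inl h => subst h; simp [pvAdj]
  | inr h0 =>
    rcases Nat.eq_zero_or_pos pts.length with hn | hn
    · simp [hn, pvAdj_eq_sum, pvAdjS]
    obtain ⟨m, hm⟩ : ∃ m, pts.length = m + 1 := ⟨pts.length - 1, by omega⟩
    simp only [hm, Nat.add_sub_cancel]
    have split : ∑ i ∈ Finset.range (m + 1),
          (pts.getD i (0, 0)).1 * ((pts.getD ((i + m) % (m + 1)) (0, 0)).2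
            - (pts.getD ((i + 1) % (m + 1)) (0, 0)).2)
        = ∑ i ∈ Finset.range (m + 1), (pts.getD i (0, 0)).1 * (pts.getD ((i + m) % (m + 1)) (0, 0)).2
          - ∑ i ∈ Finset.range (m + 1), (pts.getD i (0, 0)).1 * (pts.getD ((i + 1) % (m + 1)) (0, 0)).2 := by
      rw [← Finset.sum_sub_distrib]; apply Finset.sum_congr rfl; intro i _; ring
    rw [split]
    have hre := sum_reindex (m + 1) (by omega)
      (fun i => (pts.getD i (0, 0)).1) (fun i => (pts.getD i (0, 0)).2)
    simp only [Nat.add_sub_cancel] at hre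
    rw [hre, ← Finset.sum_sub_distrib]
    have hterm : ∑ i ∈ Finset.range (m + 1),
        ((pts.getD i (0, 0)).1 * (pts.getD ((i + m) % (m + 1)) (0, 0)).2
          - (pts.getD ((i + m) % (m + 1)) (0, 0)).1 * (pts.getD i (0, 0)).2)
        = ∑ i ∈ Finset.range (m + 1), pvCr (pts.getD i (0, 0)) (pts.getD ((i + m) % (m + 1)) (0, 0)) := by
      apply Finset.sum_congr rfl; intro i _; simp [pvCr]
    rw [hterm, Finset.sum_range_succ']
    have hz : pvCr (pts.getD 0 (0, 0)) (pts.getD ((0 + m) % (m + 1)) (0, 0)) = 0 := by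
      rw [h0]; simp [pvCr]
    rw [hz, add_zero]
    have hrest : ∑ i ∈ Finset.range m,
        pvCr (pts.getD (i + 1) (0, 0)) (pts.getD (((i + 1) + m) % (m + 1)) (0, 0))
        = ∑ i ∈ Finset.range m, - pvCr (pts.getD i (0, 0)) (pts.getD (i + 1) (0, 0)) := by
      apply Finset.sum_congr rfl; intro i hi
      have hidx : ((i + 1) + m) % (m + 1) = i := by
        rw [show (i + 1) + m = i + (m + 1) by omega, Nat.add_mod_right]
        exact Nat.mod_eq_of_lt (by have := Finset.mem_range.mp hi; omega)
      rw [hidx]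
      simp only [pvCr]; ring
    rw [hrest, Finset.sum_neg_distrib, pvAdj_eq_sum, pvAdjS, hm, Nat.add_sub_cancel]

-- the pyGet? terms of A's second loop, rewritten to getD at the pm index
lemma term_eq (pts : List (Int × Int)) (i : Nat) (hi : i < pts.length) :
    ((PySem.List.pyGet? pts (i : Int)).getD (0, 0)).1 *
      (((PySem.List.pyGet? pts ((i : Int) - 1)).getD (0, 0)).2 -
       ((PySem.List.pyGet? pts (PySem.Int.mod ((i : Int) + 1) (pts.length : Int))).getD (0, 0)).2)
    = (pts.getD i (0, 0)).1 *
        ((pts.getD ((i + (pts.length - 1)) % pts.length) (0, 0)).2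
          - (pts.getD ((i + 1) % pts.length) (0, 0)).2) := by
  have hn : 0 < pts.length := by omega
  congr 1
  · rw [PySem.List.pyGet?_natCast]
    simp [List.getD_eq_getElem?_getD]
  congr 1
  · cases i with
    | zero =>
      rw [show ((0:Nat):Int) - 1 = -1 by norm_num, PySem.List.pyGet?_neg_one]
      rw [pm_zero pts.length hn]
      rw [List.getLast?_eq_getElem?]
      simp [List.getD_eq_getElem?_getD]
    | succ k =>
      rw [show ((k+1:Nat):Int) - 1 = ((k:Nat):Int) by push_cast; ring, PySem.List.pyGet?_natCast]
      rw [pm_succ pts.length k hi]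
      simp [List.getD_eq_getElem?_getD]
  · rw [show ((i:Nat):Int) + 1 = (((i+1:Nat)):Int) by push_cast; ring]
    rw [PySem.Int.mod_natCast, PySem.List.pyGet?_natCast]
    simp [List.getD_eq_getElem?_getD]

-- A's value, in closed form
lemma count_area_closed (l : List (String × Int × String)) :
    count_area l = PySem.Int.floordiv (((pvAdj (pvPts (0, 0) l)).natAbs : Int)) 2
      - PySem.Int.floordiv (pvSteps l) 2 + 1 + pvSteps l := by
  unfold count_area
  rw [foldA_eq]
  simp only [List.nil_append, Int.zero_add]
  have hA : (List.range (pvPts (0, 0) l).length).foldl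
      (fun (area : Int) (i : Nat) =>
        area + ((PySem.List.pyGet? (pvPts (0, 0) l) (i : Int)).getD (0, 0)).1 *
          (((PySem.List.pyGet? (pvPts (0, 0) l) ((i : Int) - 1)).getD (0, 0)).2 -
           ((PySem.List.pyGet? (pvPts (0, 0) l)
              (PySem.Int.mod ((i : Int) + 1) ((pvPts (0, 0) l).length : Int))).getD (0, 0)).2))
      0 = - pvAdj (pvPts (0, 0) l) := by
    rw [foldl_range_add]
    rw [Finset.sum_congr rfl (fun i hi => term_eq (pvPts (0, 0) l) i (Finset.mem_range.mp hi))]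
    rw [cyclic_eq]
    · simp
    · cases l with
      | nil => left; rfl
      | cons i r => right; exact pvPts_head _ _ (by simp)
  rw [hA, Int.natAbs_neg]

-- ===== VERDICT (by name: the statement is the Claim_ definition above) =====
theorem count_area_spec : Claim_equal_count_area := by
  intro l _ _
  unfold Spec_count_area
  rw [count_area_closed]
  rcases List.eq_nil_or_concat l with hl | ⟨l', i, hl⟩
  · subst hl; decide
  · subst hl
    simp only [List.concat_eq_append]
    unfold count_area_alt
    rw [if_neg (by simp)]
    rw [PySem.List.slice_to_neg_one, List.dropLast_concat, foldB_eq]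
    simp only [Int.zero_add, PySem.List.pyGet?_neg_one_append_singleton, Option.getD_some]
    rw [pvTrapSum_eq, pvSteps_concat, pvPts_concat, pvChain_adj]
    ring_nf
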